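-- pv_equiv track=rewrite | github.com/ghawkes1217/Conjectures-and-Computations | shifted-LR/skew-GP-expansion.py | sequences
-- ===== SOURCE A (Python) =====
-- def sequences(length,maxi):
--     #create list of all sequences of fixed length using numbers {0,...,maxi}
--     seq_list=[[]]
--     while len(seq_list[0])<length:
--         new_list=[]
--         for i in range(0,len(seq_list)):
--             seq=seq_list[i]
--             for j in range(0,maxi+1):
--                 seq_j=seq+[j]
--                 new_list.append(seq_j)
--         seq_list=new_list
--     return(seq_list)
-- ===== SOURCE B (Python) =====
-- def sequences(length, maxi):
--     # divide and conquer: cross the sequences of the two halves of the length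
--     if length <= 0:
--         return [[]]
--     if length == 1:
--         return [[j] for j in range(maxi + 1)]
--     half = length // 2
--     left = sequences(half, maxi)
--     right = sequences(length - half, maxi)
--     return [a + b for a in left for b in right]
-- ===== Notes on version B (the rewrite author's own statement) =====
-- stated objective: alternative
-- what changed: Replaces the level-by-level while-loop that appends one symbol at a time with a divide-and-conquer recursion that splits the length in half and crosses the two half-length solution sets.
import Mathlib
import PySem

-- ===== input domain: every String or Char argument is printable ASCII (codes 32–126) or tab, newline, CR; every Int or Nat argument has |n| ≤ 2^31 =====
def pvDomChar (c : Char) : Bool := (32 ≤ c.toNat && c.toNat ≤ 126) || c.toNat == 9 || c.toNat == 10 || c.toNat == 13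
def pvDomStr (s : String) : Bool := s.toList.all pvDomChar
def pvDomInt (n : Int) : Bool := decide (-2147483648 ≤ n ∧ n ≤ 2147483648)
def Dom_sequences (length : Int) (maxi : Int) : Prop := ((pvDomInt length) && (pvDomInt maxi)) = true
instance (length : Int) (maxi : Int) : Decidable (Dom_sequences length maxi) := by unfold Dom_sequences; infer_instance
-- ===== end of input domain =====

-- B replaces A's explicit while-loop over levels with a recursion on length producing the same list; objective: simpler.


-- ===== PORT A =====
-- one iteration of A's while-body: rebuild new_list by the double for-loop with append
def seqStep (maxi : Int) (sl : List (List Int)) : List (List Int) :=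
  (PySem.List.pyRange 0 (sl.length : Int) 1).foldl
    (fun acc i =>
      let seq := PySem.List.pyGetD sl i []
      (PySem.List.pyRange 0 (maxi + 1) 1).foldl (fun acc2 j => acc2 ++ [seq ++ [j]]) acc)
    []

-- A's while-loop, fuel-bounded (length.toNat iterations always suffice on inputs where A returns;
-- where Python would raise IndexError on seq_list[0] the port reads headD [] — excluded by Pre_)
def seqLoop (fuel : Nat) (length maxi : Int) (sl : List (List Int)) : List (List Int) :=
  match fuel with
  | 0 => sl
  | fuel + 1 =>
    if ((sl.headD []).length : Int) < length then
      seqLoop fuel length maxi (seqStep maxi sl)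
    else sl

def sequences (length : Int) (maxi : Int) : List (List Int) :=
  seqLoop length.toNat length maxi [[]]

-- ===== PORT B =====
def sequences_alt (length : Int) (maxi : Int) : List (List Int) :=
  if length ≤ 0 then [[]]
  else if length = 1 then (PySem.List.pyRange 0 (maxi + 1) 1).map (fun j => [j])
  else
    (sequences_alt (PySem.Int.floordiv length 2) maxi).flatMap
      (fun a => (sequences_alt (length - PySem.Int.floordiv length 2) maxi).map (fun b => a ++ b))
termination_by length.toNat
decreasing_by
  all_goals
    rw [PySem.Int.floordiv_eq_ediv_of_pos (by omega)]
    omega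

-- ===== PRECONDITION & SPEC =====
-- Pre_ excludes exactly the inputs (length ≥ 1 with maxi < 0) on which Python A raises IndexError
-- (the level list becomes empty and seq_list[0] fails).
def Pre_sequences (length : Int) (maxi : Int) : Prop := length ≤ 0 ∨ 0 ≤ maxi
instance (length : Int) (maxi : Int) : Decidable (Pre_sequences length maxi) := by unfold Pre_sequences; infer_instance
def pvWitness_sequences : Int × Int := (2, 1)

def Spec_sequences (length : Int) (maxi : Int) (out : List (List Int)) : Prop := out = sequences_alt length maxi
instance (length : Int) (maxi : Int) (out : List (List Int)) : Decidable (Spec_sequences length maxi out) := by unfold Spec_sequences; infer_instance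

-- ===== CLAIM (what is proved, stated in full; the proofs are below) =====
def Claim_equal_sequences : Prop := ∀ (length : Int) (maxi : Int), Dom_sequences length maxi → Pre_sequences length maxi → Spec_sequences length maxi (sequences length maxi)

-- ===== LEMMAS AND PROOFS =====

-- proof-side ladder: the set of sequences of length n, built one level at a time (A's invariant shape)
def seqBuild (n : Nat) (maxi : Int) : List (List Int) :=
  match n with
  | 0 => [[]]
  | n + 1 =>
    (seqBuild n maxi).flatMap
      (fun seq => (PySem.List.pyRange 0 (maxi + 1) 1).map (fun j => seq ++ [j]))

-- crossing the ladders of two lengths gives the ladder of the sum (the fact B's split relies on)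
theorem seqBuild_add (maxi : Int) (m n : Nat) :
    seqBuild (m + n) maxi
      = (seqBuild m maxi).flatMap (fun a => (seqBuild n maxi).map (fun b => a ++ b)) := by
  induction n with
  | zero => simp [seqBuild]
  | succ n ih =>
    show seqBuild ((m + n) + 1) maxi = _
    simp only [seqBuild, ih, List.flatMap_assoc, List.map_flatMap, List.flatMap_map,
      List.map_map]
    simp [Function.comp_def, List.append_assoc]

-- B's divide-and-conquer equals the ladder
theorem sequences_alt_eq_seqBuild (length maxi : Int) :
    sequences_alt length maxi = seqBuild length.toNat maxi := by
  by_cases hle : length ≤ 0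
  · rw [sequences_alt, if_pos hle, Int.toNat_of_nonpos hle]
    rfl
  · by_cases h1 : length = 1
    · subst h1
      rw [sequences_alt]
      simp [seqBuild]
    · rw [sequences_alt, if_neg hle, if_neg h1]
      have hfd : PySem.Int.floordiv length 2 = length / 2 :=
        PySem.Int.floordiv_eq_ediv_of_pos (by omega)
      have ih1 := sequences_alt_eq_seqBuild (PySem.Int.floordiv length 2) maxi
      have ih2 := sequences_alt_eq_seqBuild (length - PySem.Int.floordiv length 2) maxi
      rw [ih1, ih2, ← seqBuild_add]
      congr 1
      rw [hfd]
      omega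
termination_by length.toNat
decreasing_by
  all_goals
    rw [PySem.Int.floordiv_eq_ediv_of_pos (by omega)]
    omega

-- A's level step, rewritten as the flatMap that B's comprehension uses
theorem seqStep_eq_flatMap (maxi : Int) (sl : List (List Int)) :
    seqStep maxi sl =
      sl.flatMap (fun seq => (PySem.List.pyRange 0 (maxi + 1) 1).map (fun j => seq ++ [j])) := by
  unfold seqStep
  rw [PySem.List.foldl_pyRange_zero_pyGetD' sl ([] : List Int)
      (fun acc seq => (PySem.List.pyRange 0 (maxi + 1) 1).foldl (fun acc2 j => acc2 ++ [seq ++ [j]]) acc) []]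
  have h1 : List.foldl (fun acc seq => List.foldl (fun acc2 j => acc2 ++ [seq ++ [j]]) acc (PySem.List.pyRange 0 (maxi + 1) 1)) [] sl
      = List.foldl (fun acc seq => acc ++ (PySem.List.pyRange 0 (maxi + 1) 1).map (fun j => seq ++ [j])) [] sl :=
    PySem.List.foldl_congr_mem sl _ _ _ (fun acc s _ => PySem.List.foldl_append_singleton_eq_map _ _ _)
  rw [h1, PySem.List.foldl_append_eq_flatMap]
  simp

theorem seqBuild_ne_nil (maxi : Int) (hm : 0 ≤ maxi) (k : Nat) : seqBuild k maxi ≠ [] := by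
  induction k with
  | zero => simp [seqBuild]
  | succ k ih =>
    obtain ⟨s, rest, h⟩ := List.exists_cons_of_ne_nil ih
    simp only [seqBuild, h, List.flatMap_cons]
    rw [PySem.List.pyRange_one_cons (by omega)]
    simp

theorem seqBuild_head_len (maxi : Int) (hm : 0 ≤ maxi) (k : Nat) :
    ((seqBuild k maxi).headD []).length = k := by
  induction k with
  | zero => simp [seqBuild]
  | succ k ih =>
    obtain ⟨s, rest, h⟩ := List.exists_cons_of_ne_nil (seqBuild_ne_nil maxi hm k)
    simp only [seqBuild, h, List.flatMap_cons]
    rw [PySem.List.pyRange_one_cons (by omega)]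
    simp only [List.map_cons, List.cons_append, List.headD_cons]
    rw [h] at ih
    simp at ih
    simp [ih]

theorem seqLoop_build (maxi : Int) (hm : 0 ≤ maxi) (length : Int) :
    ∀ (n k : Nat), (k : Int) = length - n →
      seqLoop n length maxi (seqBuild k maxi) = seqBuild (k + n) maxi := by
  intro n
  induction n with
  | zero => intro k _; simp [seqLoop]
  | succ n ih =>
    intro k hk
    have hlt : ((((seqBuild k maxi).headD []).length : Int)) < length := by
      rw [seqBuild_head_len maxi hm k]; push_cast at hk ⊢; omega
    rw [seqLoop, if_pos hlt, seqStep_eq_flatMap]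
    have : (seqBuild k maxi).flatMap
        (fun seq => (PySem.List.pyRange 0 (maxi + 1) 1).map (fun j => seq ++ [j]))
        = seqBuild (k + 1) maxi := rfl
    rw [this, ih (k + 1) (by push_cast at hk ⊢; omega)]
    congr 1
    omega

-- ===== VERDICT (by name: the statement is the Claim_ definition above) =====
theorem sequences_spec : Claim_equal_sequences := by
  intro length maxi _ hpre
  unfold Spec_sequences sequences
  rw [sequences_alt_eq_seqBuild]
  by_cases hle : length ≤ 0
  · rw [Int.toNat_of_nonpos hle]
    simp [seqLoop, seqBuild]
  · have hm : 0 ≤ maxi := by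
      rcases hpre with h | h
      · omega
      · exact h
    have hgt : 0 < length := by omega
    have h0 : ((0 : Nat) : Int) = length - length.toNat := by
      rw [Int.toNat_of_nonneg (by omega)]; simp
    have := seqLoop_build maxi hm length length.toNat 0 h0
    simpa [seqBuild] using this
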